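-- pv_equiv track=rewrite | github.com/eziong/algorithm | level1/2920.py | scaling
-- ===== SOURCE A (Python) =====
-- def scaling(scale):
--     ret = 0
--     for i in range(len(scale)-1):
--         if ret == 0:
--             if scale[i+1] > scale[i]:
--                 ret = 1
--             elif scale[i+1] == scale[i]:
--                 ret = 0
--             else:
--                 ret = -1
--         if ret == 1:
--             if scale[i+1] >= scale[i]:
--                 ret = 1
--             else:
--                 ret = -2
--         if ret == -1:
--             if scale[i+1] > scale[i]:
--                 ret = 2
--             else:
--                 ret = -1
--     return ret
-- ===== SOURCE B (Python) =====
-- def scaling(scale):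
--     pairs = list(zip(scale, scale[1:]))
--     nondec = all(a <= b for a, b in pairs)
--     noninc = all(a >= b for a, b in pairs)
--     if nondec and noninc:
--         return 0
--     if nondec:
--         return 1
--     if noninc:
--         return -1
--     # mixed: direction of the first strict step decides
--     for a, b in pairs:
--         if a < b:
--             return -2
--         if a > b:
--             return 2
-- ===== Notes on version B (the rewrite author's own statement) =====
-- stated objective: simpler
-- what changed: Replaced A's per-step fall-through state machine (ret transitioning through 0/1/-1/2/-2) by two monotonicity predicates over the adjacent pairs plus, in the mixed case, a single scan for the first strictly non-equal step.
import Mathlib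
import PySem

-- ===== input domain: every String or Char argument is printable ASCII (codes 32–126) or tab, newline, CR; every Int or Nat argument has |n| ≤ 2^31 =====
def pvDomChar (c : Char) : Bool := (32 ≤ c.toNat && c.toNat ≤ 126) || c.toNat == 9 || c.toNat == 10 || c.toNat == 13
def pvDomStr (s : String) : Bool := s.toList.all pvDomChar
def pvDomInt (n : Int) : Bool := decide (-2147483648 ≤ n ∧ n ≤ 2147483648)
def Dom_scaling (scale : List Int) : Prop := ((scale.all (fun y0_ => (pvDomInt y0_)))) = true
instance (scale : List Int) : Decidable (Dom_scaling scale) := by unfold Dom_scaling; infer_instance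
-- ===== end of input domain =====

-- B replaces A's per-step fall-through state machine by two monotonicity predicates
-- plus a first-strict-step scan (objective: simpler decomposition; same cost).

-- ===== PORT A =====
-- loop body of A: the three sequential `if` blocks updating ret for one step (a = scale[i], b = scale[i+1])
def stepA (ret a b : Int) : Int :=
  let r1 := if ret = 0 then (if b > a then 1 else if b = a then 0 else -1) else ret
  let r2 := if r1 = 1 then (if b ≥ a then 1 else -2) else r1
  if r2 = -1 then (if b > a then 2 else -1) else r2

def scaling (scale : List Int) : Int :=
  (PySem.List.pyRange 0 ((scale.length : Int) - 1) 1).foldl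
    (fun ret i => stepA ret (PySem.List.pyGetD scale i 0) (PySem.List.pyGetD scale (i + 1) 0)) 0

-- ===== PORT B =====
-- the final for-loop of Source B: first strictly non-equal pair decides (0 is unreachable in B's branch)
def firstDir : List (Int × Int) → Int
  | [] => 0
  | (a, b) :: t => if a < b then -2 else if a > b then 2 else firstDir t

def scaling_alt (scale : List Int) : Int :=
  let pairs := scale.zip (PySem.List.slice scale (some 1) none)
  let nondec := pairs.all (fun p => p.1 ≤ p.2)
  let noninc := pairs.all (fun p => p.1 ≥ p.2)
  if nondec && noninc then 0
  else if nondec then 1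
  else if noninc then -1
  else firstDir pairs

-- ===== PRECONDITION & SPEC =====
def Spec_scaling (scale : List Int) (out : Int) : Prop := out = scaling_alt scale
instance (scale : List Int) (out : Int) : Decidable (Spec_scaling scale out) := by unfold Spec_scaling; infer_instance

-- ===== CLAIM (what is proved, stated in full; the proofs are below) =====
def Claim_equal_scaling : Prop := ∀ (scale : List Int), Dom_scaling scale → Spec_scaling scale (scaling scale)

-- ===== LEMMAS AND PROOFS =====

-- stepA on each of the five states
lemma stepA_zero_lt {a b : Int} (h : a < b) : stepA 0 a b = 1 := by
  simp [stepA, h, le_of_lt h]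

lemma stepA_zero_eq {a b : Int} (h : a = b) : stepA 0 a b = 0 := by
  simp [stepA, h]

lemma stepA_zero_gt {a b : Int} (h : b < a) : stepA 0 a b = -1 := by
  simp [stepA, not_lt.mpr (le_of_lt h), ne_of_lt h]

lemma stepA_one (a b : Int) : stepA 1 a b = if a ≤ b then 1 else -2 := by
  by_cases h : a ≤ b <;> simp [stepA, h]

lemma stepA_neg_one (a b : Int) : stepA (-1) a b = if a < b then 2 else -1 := by
  simp [stepA]

lemma stepA_two (a b : Int) : stepA 2 a b = 2 := by simp [stepA]

lemma stepA_neg_two (a b : Int) : stepA (-2) a b = -2 := by simp [stepA]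

-- the pair-level step function; A's loop is a foldl of this over consecutive pairs
def stepP (r : Int) (p : Int × Int) : Int := stepA r p.1 p.2

lemma foldl_stepP_two (ps : List (Int × Int)) : ps.foldl stepP 2 = 2 := by
  induction ps with
  | nil => rfl
  | cons p t ih => simpa [stepP, stepA_two] using ih

lemma foldl_stepP_neg_two (ps : List (Int × Int)) : ps.foldl stepP (-2) = -2 := by
  induction ps with
  | nil => rfl
  | cons p t ih => simpa [stepP, stepA_neg_two] using ih

lemma foldl_stepP_one (ps : List (Int × Int)) :
    ps.foldl stepP 1 = if ps.all (fun p => p.1 ≤ p.2) then 1 else -2 := by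
  induction ps with
  | nil => rfl
  | cons p t ih =>
    by_cases h : p.1 ≤ p.2
    · simp only [List.foldl_cons, stepP, stepA_one, if_pos h, ih, List.all_cons,
        decide_eq_true h, Bool.true_and]
    · simp only [List.foldl_cons, stepP, stepA_one, if_neg h, foldl_stepP_neg_two,
        List.all_cons, decide_eq_false h, Bool.false_and, Bool.false_eq_true, if_false]

lemma foldl_stepP_neg_one (ps : List (Int × Int)) :
    ps.foldl stepP (-1) = if ps.all (fun p => p.1 ≥ p.2) then -1 else 2 := by
  induction ps with
  | nil => rfl
  | cons p t ih =>
    by_cases h : p.1 < p.2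
    · have h' : ¬ p.1 ≥ p.2 := not_le.mpr h
      simp only [List.foldl_cons, stepP, stepA_neg_one, if_pos h, foldl_stepP_two,
        List.all_cons, decide_eq_false h', Bool.false_and, Bool.false_eq_true, if_false]
    · have h' : p.1 ≥ p.2 := not_lt.mp h
      simp only [List.foldl_cons, stepP, stepA_neg_one, if_neg h, ih, List.all_cons,
        decide_eq_true h', Bool.true_and]

-- B as a function of the pair list
def classify (ps : List (Int × Int)) : Int :=
  if ps.all (fun p => p.1 ≤ p.2) && ps.all (fun p => p.1 ≥ p.2) then 0
  else if ps.all (fun p => p.1 ≤ p.2) then 1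
  else if ps.all (fun p => p.1 ≥ p.2) then -1
  else firstDir ps

lemma foldl_stepP_zero (ps : List (Int × Int)) : ps.foldl stepP 0 = classify ps := by
  induction ps with
  | nil => rfl
  | cons p t ih =>
    obtain ⟨a, b⟩ := p
    rcases lt_trichotomy a b with h | h | h
    · -- first step strictly increases
      simp only [List.foldl_cons, stepP, stepA_zero_lt h, foldl_stepP_one]
      simp only [classify, firstDir, List.all_cons, decide_eq_true (le_of_lt h),
        decide_eq_false (not_le.mpr h), Bool.true_and, Bool.false_and, Bool.and_false,
        Bool.false_eq_true, if_false, if_pos h]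
    · -- equal step: drop it on both sides
      subst h
      simp only [List.foldl_cons, stepP, stepA_zero_eq rfl, ih]
      simp only [classify, List.all_cons, decide_eq_true (le_refl a), Bool.true_and]
      simp [firstDir]
    · -- first step strictly decreases
      simp only [List.foldl_cons, stepP, stepA_zero_gt h, foldl_stepP_neg_one]
      simp only [classify, firstDir, List.all_cons, decide_eq_true (le_of_lt h),
        decide_eq_false (not_le.mpr h), Bool.true_and, Bool.false_and,
        Bool.false_eq_true, if_false, if_neg (not_lt.mpr (le_of_lt h)), if_pos h]

-- A's index loop equals the foldl of stepP over consecutive pairs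
lemma scaling_eq_pairs (xs : List Int) :
    scaling xs = (xs.zip xs.tail).foldl stepP 0 := by
  suffices h : ∀ (xs : List Int) (s : Int),
      (PySem.List.pyRange 0 ((xs.length : Int) - 1) 1).foldl
        (fun ret i => stepA ret (PySem.List.pyGetD xs i 0) (PySem.List.pyGetD xs (i + 1) 0)) s
      = (xs.zip xs.tail).foldl stepP s by
    exact h xs 0
  intro xs
  induction xs with
  | nil => intro s; rw [PySem.List.pyRange_one_eq_nil (by simp)]; rfl
  | cons x ys ih =>
    intro s
    cases ys with
    | nil => rw [PySem.List.pyRange_one_eq_nil (by simp)]; rfl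
    | cons y t =>
      have hlen : ((x :: y :: t).length : Int) - 1 = ((y :: t).length : Int) := by
        push_cast [List.length_cons]
        ring
      rw [hlen, PySem.List.pyRange_one_cons (by push_cast [List.length_cons]; omega)]
      simp only [List.foldl_cons]
      have e1 : PySem.List.pyGetD (x :: y :: t) 0 0 = x := by
        simp [PySem.List.pyGetD_zero_cons]
      have e2 : PySem.List.pyGetD (x :: y :: t) (0 + 1) 0 = y := by
        rw [show ((0 : Int) + 1) = ((1 : Nat) : Int) by norm_num, PySem.List.pyGetD_natCast]
        rfl
      rw [e1, e2, show ((0 : Int) + 1) = (1 : Int) by norm_num]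
      -- shift the range [1, n+1) to [0, n) and the list (x :: y :: t) to (y :: t)
      have hshift :
          (PySem.List.pyRange 1 ((y :: t).length : Int) 1).foldl
            (fun ret i => stepA ret (PySem.List.pyGetD (x :: y :: t) i 0)
              (PySem.List.pyGetD (x :: y :: t) (i + 1) 0)) (stepA s x y)
          = (PySem.List.pyRange 0 (((y :: t).length : Int) - 1) 1).foldl
            (fun ret i => stepA ret (PySem.List.pyGetD (y :: t) i 0)
              (PySem.List.pyGetD (y :: t) (i + 1) 0)) (stepA s x y) := by
        rw [PySem.List.pyRange_one, PySem.List.pyRange_one, List.foldl_map, List.foldl_map]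
        have hn : (((y :: t).length : Int) - 1 - 0).toNat = (((y :: t).length : Int) - 1).toNat := by
          omega
        rw [hn]
        apply PySem.List.foldl_congr_mem
        intro acc k hk
        have h1 : PySem.List.pyGetD (x :: y :: t) (1 + (k : Int)) 0
            = PySem.List.pyGetD (y :: t) (0 + (k : Int)) 0 := by
          rw [show (1 + (k : Int)) = (((k + 1 : Nat)) : Int) by push_cast; ring,
            show ((0 : Int) + (k : Int)) = ((k : Nat) : Int) by ring,
            PySem.List.pyGetD_natCast, PySem.List.pyGetD_natCast]
          rfl
        have h2 : PySem.List.pyGetD (x :: y :: t) (1 + (k : Int) + 1) 0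
            = PySem.List.pyGetD (y :: t) (0 + (k : Int) + 1) 0 := by
          rw [show (1 + (k : Int) + 1) = (((k + 2 : Nat)) : Int) by push_cast; ring,
            show ((0 : Int) + (k : Int) + 1) = ((k + 1 : Nat) : Int) by push_cast; ring,
            PySem.List.pyGetD_natCast, PySem.List.pyGetD_natCast]
          rfl
        rw [h1, h2]
      rw [hshift, ih (stepA s x y)]
      rfl

-- scaling_alt unfolded to classify over the pairs
lemma scaling_alt_eq_classify (xs : List Int) :
    scaling_alt xs = classify (xs.zip xs.tail) := by
  simp only [scaling_alt, classify, PySem.List.slice_from_one]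

-- ===== VERDICT (by name: the statement is the Claim_ definition above) =====
theorem scaling_spec : Claim_equal_scaling := by
  intro scale _
  unfold Spec_scaling
  rw [scaling_eq_pairs, scaling_alt_eq_classify, foldl_stepP_zero]
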